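-- pv_equiv track=rewrite | github.com/rraj7/leetcode | 189-RotateArray.py | ArrayRotation
-- ===== SOURCE A (Python) =====
-- def ArrayRotation(array,k):
--   sol = []
--   temp1 = array[:-2]
--   temp2 = array[-2:]
--   for i in temp2:
--     sol.append(i)
--   for i in temp1:
--     sol.append(i)
--   return sol
-- ===== SOURCE B (Python) =====
-- def ArrayRotation(array, k):
--     n = len(array)
--     sol = []
--     for i in range(n):
--         sol.append(array[(i - 2) % n])
--     return sol
-- ===== Notes on version B (the rewrite author's own statement) =====
-- stated objective: alternative
-- what changed: Replaces the two slice-copy passes (array[-2:] then array[:-2]) by a single loop that computes each output position directly with modular index arithmetic (i-2) % n.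
import Mathlib
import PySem

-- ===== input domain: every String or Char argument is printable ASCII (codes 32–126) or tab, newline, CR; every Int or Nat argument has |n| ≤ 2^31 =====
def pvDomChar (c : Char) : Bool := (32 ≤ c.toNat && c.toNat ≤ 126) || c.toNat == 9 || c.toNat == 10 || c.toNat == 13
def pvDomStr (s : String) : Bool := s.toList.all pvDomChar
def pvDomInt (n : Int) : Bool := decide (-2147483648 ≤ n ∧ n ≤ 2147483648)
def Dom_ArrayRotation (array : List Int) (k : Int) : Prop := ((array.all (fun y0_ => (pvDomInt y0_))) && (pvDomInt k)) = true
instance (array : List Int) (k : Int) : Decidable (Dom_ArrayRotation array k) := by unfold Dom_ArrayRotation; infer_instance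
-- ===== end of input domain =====

-- ===== PORT A =====
-- B replaces the two slice-copy passes by one loop with modular index arithmetic; same result proved equal.
def ArrayRotation (array : List Int) (k : Int) : List Int :=
  let sol : List Int := []
  let temp1 := PySem.List.slice array none (some (-2))
  let temp2 := PySem.List.slice array (some (-2)) none
  let sol := temp2.foldl (fun s i => s ++ [i]) sol
  let sol := temp1.foldl (fun s i => s ++ [i]) sol
  sol

-- ===== PORT B =====
-- array[(i-2) % n] is always in range (0 ≤ (i-2) % n < n), so the pyGetD default is never used.
def ArrayRotation_alt (array : List Int) (k : Int) : List Int :=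
  let n : Int := array.length
  (PySem.List.pyRange 0 n 1).foldl
    (fun sol i => sol ++ [PySem.List.pyGetD array (PySem.Int.mod (i - 2) n) 0]) []

-- ===== PRECONDITION & SPEC =====
def Spec_ArrayRotation (array : List Int) (k : Int) (out : List Int) : Prop := out = ArrayRotation_alt array k
instance (array : List Int) (k : Int) (out : List Int) : Decidable (Spec_ArrayRotation array k out) := by unfold Spec_ArrayRotation; infer_instance

-- ===== CLAIM (what is proved, stated in full; the proofs are below) =====
def Claim_equal_ArrayRotation : Prop := ∀ (array : List Int) (k : Int), Dom_ArrayRotation array k → Spec_ArrayRotation array k (ArrayRotation array k)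

-- ===== LEMMAS AND PROOFS =====

-- ===== VERDICT (by name: the statement is the Claim_ definition above) =====
-- The single modular-index loop enumerates exactly drop (n-2) ++ take (n-2).
theorem rot_map_eq (xs : List Int) :
    (PySem.List.pyRange 0 (xs.length : Int) 1).map
      (fun i => PySem.List.pyGetD xs (PySem.Int.mod (i - 2) (xs.length : Int)) 0)
    = xs.drop (xs.length - 2) ++ xs.take (xs.length - 2) := by
  apply List.ext_getElem
  · simp only [List.length_map, PySem.List.length_pyRange_one, List.length_append,
      List.length_drop, List.length_take, Int.sub_zero, Int.toNat_natCast]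
    omega
  · intro j h1 h2
    simp only [List.length_map, PySem.List.length_pyRange_one, Int.sub_zero,
      Int.toNat_natCast] at h1
    rw [List.getElem_map, PySem.List.getElem_pyRange_one]
    have hn : 0 < xs.length := Nat.lt_of_le_of_lt (Nat.zero_le j) h1
    simp only [Int.zero_add]
    by_cases h2n : 2 ≤ xs.length
    · have hnI : (2:Int) ≤ (xs.length : Int) := by exact_mod_cast h2n
      have hjI : (j:Int) < (xs.length : Int) := by exact_mod_cast h1
      rw [PySem.Int.mod_eq_emod_of_pos (by omega : (0:Int) < (xs.length : Int))]
      by_cases hj : 2 ≤ j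
      · have hjI2 : (2:Int) ≤ (j:Int) := by exact_mod_cast hj
        have hmod : ((j:Int) - 2) % (xs.length : Int) = (j:Int) - 2 :=
          Int.emod_eq_of_lt (by omega) (by omega)
        rw [hmod, PySem.List.pyGetD_eq_getElem _ _ (by omega) (by omega)]
        rw [List.getElem_append_right (by simp; omega)]
        simp only [List.getElem_take]
        congr 1
        simp
        omega
      · have hmod : ((j:Int) - 2) % (xs.length : Int) = (j:Int) - 2 + (xs.length : Int) := by
          rw [← Int.add_mul_emod_self_left (b := (xs.length : Int)) (c := 1)]
          rw [Int.mul_one]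
          exact Int.emod_eq_of_lt (by omega) (by omega)
        rw [hmod, PySem.List.pyGetD_eq_getElem _ _ (by omega) (by omega)]
        rw [List.getElem_append_left (by simp; omega)]
        simp only [List.getElem_drop]
        congr 1
        omega
    · -- xs.length = 1, j = 0
      have hx1 : xs.length = 1 := by omega
      have hj0 : j = 0 := by omega
      subst hj0
      obtain ⟨x, hxs⟩ : ∃ x, xs = [x] := by
        match xs, hx1 with
        | [x], _ => exact ⟨x, rfl⟩
      subst hxs
      simp [PySem.List.pyGetD]

theorem rot_main : ∀ (xs : List Int) (k : Int), ArrayRotation xs k = ArrayRotation_alt xs k := by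
  intro xs k
  unfold ArrayRotation ArrayRotation_alt
  simp only [PySem.List.foldl_append_singleton_eq_self,
    PySem.List.foldl_append_singleton_eq_map, List.nil_append]
  rw [PySem.List.slice_from_neg_ofNat xs 2 (by omega),
    PySem.List.slice_to_neg_ofNat xs 2 (by omega)]
  rw [rot_map_eq]

theorem ArrayRotation_spec : Claim_equal_ArrayRotation := by
  intro array k _
  unfold Spec_ArrayRotation
  exact rot_main array k
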